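-- pv_equiv track=rewrite | github.com/posl/comment_recommendation | script/mod_gen/2_time/zh/163_A/5.py | calc
-- ===== SOURCE A (Python) =====
-- def calc(s):
--     n = len(s)
--     cnt = 0
--     for i in range(n):
--         for j in range(i+1, n):
--             if s[i] == s[j]:
--                 continue
--             k = 2*j - i
--             if k >= n:
--                 continue
--             if s[i] == s[k] or s[j] == s[k]:
--                 continue
--             cnt += 1
--     return cnt
-- ===== SOURCE B (Python) =====
-- def calc(s):
--     n = len(s)
--     bad = 0
--     for q in range(n):
--         for p in range(q):
--             if s[p] == s[q]:
--                 if 2 * q - p < n: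
--                     bad += 1
--                 if 2 * p >= q:
--                     bad += 1
--                 if (p + q) % 2 == 0:
--                     bad += 1
--                     if s[(p + q) // 2] == s[q]:
--                         bad -= 2
--     return (n - 1) ** 2 // 4 - bad
-- ===== Notes on version B (the rewrite author's own statement) =====
-- stated objective: alternative
-- what changed: B counts by complement and inclusion-exclusion: the total number of index APs (i,j,k) comes from the closed form (n-1)**2//4, and from it B subtracts a weighted count over pairs of EQUAL characters only (each equal pair charged for the AP roles it can play, with a -2 correction when all three characters coincide), instead of A's direct enumeration of AP triples testing pairwise distinctness.
import Mathlib
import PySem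

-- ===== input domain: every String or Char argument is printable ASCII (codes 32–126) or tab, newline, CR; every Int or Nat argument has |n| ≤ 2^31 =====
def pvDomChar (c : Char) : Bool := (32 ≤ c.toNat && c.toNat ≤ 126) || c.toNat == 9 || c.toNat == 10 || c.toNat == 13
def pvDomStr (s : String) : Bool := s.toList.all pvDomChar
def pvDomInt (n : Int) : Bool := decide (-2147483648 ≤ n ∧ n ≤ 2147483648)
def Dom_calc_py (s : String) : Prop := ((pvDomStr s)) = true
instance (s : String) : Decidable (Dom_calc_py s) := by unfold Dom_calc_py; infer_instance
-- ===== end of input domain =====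

-- B counts by complement and inclusion-exclusion: total APs (n-1)^2//4 minus a weighted count
-- over equal-character pairs only, instead of A's direct enumeration of AP triples; objective: alternative.

-- ===== PORT A =====
def calc_py (s : String) : Int :=
  let n : Int := (PySem.Str.len s : Int)
  (PySem.List.pyRange 0 n).foldl (fun cnt i =>
    (PySem.List.pyRange (i + 1) n).foldl (fun cnt j =>
      if PySem.Str.pyGet? s i == PySem.Str.pyGet? s j then cnt
      else
        let k := 2 * j - i
        if k ≥ n then cnt
        else if PySem.Str.pyGet? s i == PySem.Str.pyGet? s k
                || PySem.Str.pyGet? s j == PySem.Str.pyGet? s k then cnt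
        else cnt + 1) cnt) 0

-- ===== PORT B =====
def calc_py_alt (s : String) : Int :=
  let n : Int := (PySem.Str.len s : Int)
  let bad : Int :=
    (PySem.List.pyRange 0 n).foldl (fun bad q =>
      (PySem.List.pyRange 0 q).foldl (fun bad p =>
        if PySem.Str.pyGet? s p == PySem.Str.pyGet? s q then
          let bad := if 2 * q - p < n then bad + 1 else bad
          let bad := if 2 * p ≥ q then bad + 1 else bad
          if PySem.Int.mod (p + q) 2 == 0 then
            let bad := bad + 1
            if PySem.Str.pyGet? s (PySem.Int.floordiv (p + q) 2) == PySem.Str.pyGet? s q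
            then bad - 2 else bad
          else bad
        else bad) bad) 0
  PySem.Int.floordiv ((n - 1) ^ 2) 4 - bad

-- ===== PRECONDITION & SPEC =====
def Spec_calc_py (s : String) (out : Int) : Prop := out = calc_py_alt s
instance (s : String) (out : Int) : Decidable (Spec_calc_py s out) := by unfold Spec_calc_py; infer_instance

-- ===== CLAIM (what is proved, stated in full; the proofs are below) =====
def Claim_equal_calc_py : Prop := ∀ (s : String), Dom_calc_py s → Spec_calc_py s (calc_py s)

-- ===== LEMMAS AND PROOFS =====

-- Nat-level per-pair terms (p < q intended): A's triple test at (p, q, 2q-p)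
def pvTA (cs : List Char) (p q : Nat) : Int :=
  if cs[p]? = cs[q]? then 0
  else if cs.length ≤ 2 * q - p then 0
  else if cs[p]? = cs[2 * q - p]? ∨ cs[q]? = cs[2 * q - p]? then 0
  else 1

-- B's weighted equal-pair charge at (p, q)
def pvTB (cs : List Char) (p q : Nat) : Int :=
  if cs[p]? = cs[q]? then
    (if 2 * q - p < cs.length then 1 else 0)
    + (if q ≤ 2 * p then 1 else 0)
    + (if (p + q) % 2 = 0 then (if cs[(p + q) / 2]? = cs[q]? then -1 else 1) else 0)
  else 0

-- inclusion-exclusion pieces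
def pvC0 (n p q : Nat) : Int := if 2 * q - p < n then 1 else 0
def pvE1 (cs : List Char) (p q : Nat) : Int :=
  if cs[p]? = cs[q]? ∧ 2 * q - p < cs.length then 1 else 0
def pvE2A (cs : List Char) (p q : Nat) : Int :=
  if 2 * q - p < cs.length ∧ cs[q]? = cs[2 * q - p]? then 1 else 0
def pvE2B (cs : List Char) (p q : Nat) : Int :=
  if cs[p]? = cs[q]? ∧ q ≤ 2 * p then 1 else 0
def pvE3A (cs : List Char) (p q : Nat) : Int :=
  if 2 * q - p < cs.length ∧ cs[p]? = cs[2 * q - p]? then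
    (if cs[p]? = cs[q]? then -1 else 1) else 0
def pvE3B (cs : List Char) (p q : Nat) : Int :=
  if cs[p]? = cs[q]? ∧ (p + q) % 2 = 0 then
    (if cs[(p + q) / 2]? = cs[q]? then -1 else 1) else 0

-- the triangle of index pairs p < q < n
def pvSS (n : Nat) : Finset (Nat × Nat) :=
  (Finset.range n ×ˢ Finset.range n).filter (fun z => z.1 < z.2)

-- Int-level loop-body terms (transcribing the ports)
def pvTermA (cs : List Char) (n i j : Int) : Int :=
  if PySem.List.pyGet? cs i == PySem.List.pyGet? cs j then 0
  else if 2 * j - i ≥ n then 0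
  else if PySem.List.pyGet? cs i == PySem.List.pyGet? cs (2 * j - i)
          || PySem.List.pyGet? cs j == PySem.List.pyGet? cs (2 * j - i) then 0
  else 1

def pvTermB (cs : List Char) (q p : Int) : Int :=
  if PySem.List.pyGet? cs p == PySem.List.pyGet? cs q then
    (if 2 * q - p < (cs.length : Int) then 1 else 0)
    + (if 2 * p ≥ q then 1 else 0)
    + (if PySem.Int.mod (p + q) 2 == 0 then
        (if PySem.List.pyGet? cs (PySem.Int.floordiv (p + q) 2) == PySem.List.pyGet? cs q
         then -1 else 1) else 0)
  else 0

lemma pvPyRange_natCast (a b : Nat) :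
    PySem.List.pyRange ↑a ↑b = (List.range (b - a)).map (fun t => ((a + t : Nat) : Int)) := by
  rw [PySem.List.pyRange_of_pos _ _ (by norm_num : (0:Int) < 1)]
  have h1 : (if (a:Int) < (b:Int) then (((b:Int) - ↑a + 1 - 1) / 1).toNat else 0) = b - a := by
    split_ifs with h
    · simp only [Int.ediv_one]; omega
    · omega
  rw [h1]
  apply List.map_congr_left
  intro k _
  push_cast; ring

lemma pvSumRange (n : Nat) (f : Nat → Int) :
    ((List.range n).map f).sum = ∑ i ∈ Finset.range n, f i := by
  simp [Finset.range, Finset.sum, Multiset.range]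

lemma pvA_body (s : String) (n i : Int) (l : List Int) (c : Int) :
    l.foldl (fun cnt j =>
      if PySem.Str.pyGet? s i == PySem.Str.pyGet? s j then cnt
      else if 2 * j - i ≥ n then cnt
      else if PySem.Str.pyGet? s i == PySem.Str.pyGet? s (2 * j - i)
              || PySem.Str.pyGet? s j == PySem.Str.pyGet? s (2 * j - i) then cnt
      else cnt + 1) c
    = c + (l.map (pvTermA s.toList n i)).sum := by
  have hb : (fun (cnt j : Int) =>
      if PySem.Str.pyGet? s i == PySem.Str.pyGet? s j then cnt
      else if 2 * j - i ≥ n then cnt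
      else if PySem.Str.pyGet? s i == PySem.Str.pyGet? s (2 * j - i)
              || PySem.Str.pyGet? s j == PySem.Str.pyGet? s (2 * j - i) then cnt
      else cnt + 1)
      = fun cnt j => cnt + pvTermA s.toList n i j := by
    funext cnt j
    simp only [pvTermA, PySem.Str.pyGet?_eq, PySem.Chars.pyGet?_eq_listPyGet?]
    split_ifs <;> ring
  rw [hb, PySem.List.foldl_add]

lemma pvB_body (s : String) (q : Int) (l : List Int) (c : Int) :
    l.foldl (fun bad p =>
      if PySem.Str.pyGet? s p == PySem.Str.pyGet? s q then
        let bad := if 2 * q - p < (PySem.Str.len s : Int) then bad + 1 else bad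
        let bad := if 2 * p ≥ q then bad + 1 else bad
        if PySem.Int.mod (p + q) 2 == 0 then
          let bad := bad + 1
          if PySem.Str.pyGet? s (PySem.Int.floordiv (p + q) 2) == PySem.Str.pyGet? s q
          then bad - 2 else bad
        else bad
      else bad) c
    = c + (l.map (pvTermB s.toList q)).sum := by
  have hb : (fun (bad p : Int) =>
      if PySem.Str.pyGet? s p == PySem.Str.pyGet? s q then
        let bad := if 2 * q - p < (PySem.Str.len s : Int) then bad + 1 else bad
        let bad := if 2 * p ≥ q then bad + 1 else bad
        if PySem.Int.mod (p + q) 2 == 0 then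
          let bad := bad + 1
          if PySem.Str.pyGet? s (PySem.Int.floordiv (p + q) 2) == PySem.Str.pyGet? s q
          then bad - 2 else bad
        else bad
      else bad)
      = fun bad p => bad + pvTermB s.toList q p := by
    funext bad p
    simp only [pvTermB, PySem.Str.pyGet?_eq, PySem.Chars.pyGet?_eq_listPyGet?, PySem.Str.len_eq]
    split_ifs <;> ring
  rw [hb, PySem.List.foldl_add]

-- cast lemmas down to the Nat-level terms
lemma pvTermA_cast (cs : List Char) (p q : Nat) (h : p < q) :
    pvTermA cs ↑cs.length ↑p ↑q = pvTA cs p q := by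
  have hk : (2 * (q:Int) - ↑p) = ((2 * q - p : Nat) : Int) := by omega
  have hge : ((2 * (q:Int) - ↑p) ≥ ↑cs.length) ↔ cs.length ≤ 2 * q - p := by omega
  simp only [pvTermA, pvTA, hk, PySem.List.pyGet?_natCast, beq_iff_eq, Bool.or_eq_true]
  split_ifs <;> first | rfl | omega

lemma pvTermB_cast (cs : List Char) (p q : Nat) (h : p < q) :
    pvTermB cs ↑q ↑p = pvTB cs p q := by
  have hk : (2 * (q:Int) - ↑p) = ((2 * q - p : Nat) : Int) := by omega
  have hpq : ((p:Int) + ↑q) = ((p + q : Nat) : Int) := by push_cast; ring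
  have hge : (2 * (p:Int) ≥ ↑q) ↔ q ≤ 2 * p := by omega
  have hlt : (((2 * q - p : Nat) : Int) < (cs.length : Int)) ↔ 2 * q - p < cs.length := by omega
  have h1 : PySem.Int.mod ((p + q : Nat) : Int) 2 = (((p + q) % 2 : Nat) : Int) := by
    exact_mod_cast PySem.Int.mod_natCast (p + q) 2
  have h2 : PySem.Int.floordiv ((p + q : Nat) : Int) 2 = (((p + q) / 2 : Nat) : Int) := by
    exact_mod_cast PySem.Int.floordiv_natCast (p + q) 2
  simp only [pvTermB, pvTB, hk, hpq, h1, h2, hge, hlt, PySem.List.pyGet?_natCast, beq_iff_eq,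
    Nat.cast_eq_zero]

-- pointwise inclusion-exclusion splits
lemma pvTA_split (cs : List Char) (p q : Nat) :
    pvTA cs p q = pvC0 cs.length p q - pvE1 cs p q - pvE2A cs p q - pvE3A cs p q := by
  unfold pvTA pvC0 pvE1 pvE2A pvE3A
  split_ifs <;> first | omega | (exfalso; simp_all)

lemma pvTB_split (cs : List Char) (p q : Nat) :
    pvTB cs p q = pvE1 cs p q + pvE2B cs p q + pvE3B cs p q := by
  unfold pvTB pvE1 pvE2B pvE3B
  split_ifs <;> first | omega | (exfalso; simp_all)

-- sum-shape lemmas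
lemma pvTriangle2 (n : Nat) (f : Nat → Nat → Int) :
    (∑ q ∈ Finset.range n, ∑ p ∈ Finset.range q, f p q) = ∑ z ∈ pvSS n, f z.1 z.2 := by
  have h1 : (∑ z ∈ pvSS n, f z.1 z.2)
      = ∑ p ∈ Finset.range n, ∑ q ∈ Finset.range n, if p < q then f p q else 0 := by
    rw [pvSS, Finset.sum_filter, Finset.sum_product]
  rw [h1, Finset.sum_comm]
  refine Finset.sum_congr rfl fun q hq => ?_
  have hf : (Finset.range n).filter (fun p => p < q) = Finset.range q := by
    ext p
    simp only [Finset.mem_filter, Finset.mem_range]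
    have := Finset.mem_range.1 hq
    omega
  rw [← Finset.sum_filter, hf]

lemma pvTriangle1 (n : Nat) (f : Nat → Nat → Int) :
    (∑ i ∈ Finset.range n, ∑ t ∈ Finset.range (n - (i + 1)), f i (i + 1 + t))
    = ∑ z ∈ pvSS n, f z.1 z.2 := by
  have h1 : (∑ z ∈ pvSS n, f z.1 z.2)
      = ∑ i ∈ Finset.range n, ∑ j ∈ Finset.range n, if i < j then f i j else 0 := by
    rw [pvSS, Finset.sum_filter, Finset.sum_product]
  rw [h1]
  refine Finset.sum_congr rfl fun i _ => ?_
  have hf : (Finset.range n).filter (fun j => i < j) = Finset.Ico (i + 1) n := by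
    ext j
    simp only [Finset.mem_filter, Finset.mem_range, Finset.mem_Ico]
    omega
  rw [← Finset.sum_filter, hf, Finset.sum_Ico_eq_sum_range]

-- the two reindexing bijections
lemma pvE2_reindex (cs : List Char) :
    (∑ z ∈ pvSS cs.length, pvE2A cs z.1 z.2) = ∑ z ∈ pvSS cs.length, pvE2B cs z.1 z.2 := by
  rw [show (∑ z ∈ pvSS cs.length, pvE2A cs z.1 z.2)
      = ∑ z ∈ (pvSS cs.length).filter
          (fun z => 2 * z.2 - z.1 < cs.length ∧ cs[z.2]? = cs[2 * z.2 - z.1]?), (1 : Int) from by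
    rw [Finset.sum_filter]; exact Finset.sum_congr rfl fun z _ => rfl]
  rw [show (∑ z ∈ pvSS cs.length, pvE2B cs z.1 z.2)
      = ∑ z ∈ (pvSS cs.length).filter
          (fun z => cs[z.1]? = cs[z.2]? ∧ z.2 ≤ 2 * z.1), (1 : Int) from by
    rw [Finset.sum_filter]; exact Finset.sum_congr rfl fun z _ => rfl]
  refine Finset.sum_nbij' (fun z => (z.2, 2 * z.2 - z.1)) (fun w => (2 * w.1 - w.2, w.1))
    ?_ ?_ ?_ ?_ ?_
  · rintro ⟨p, q⟩ hz
    simp only [pvSS, Finset.mem_filter, Finset.mem_product, Finset.mem_range] at hz ⊢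
    obtain ⟨⟨⟨hp, hq⟩, hpq⟩, hk, hch⟩ := hz
    exact ⟨⟨⟨hq, hk⟩, by omega⟩, hch, by omega⟩
  · rintro ⟨p, q⟩ hw
    simp only [pvSS, Finset.mem_filter, Finset.mem_product, Finset.mem_range] at hw ⊢
    obtain ⟨⟨⟨hp, hq⟩, hpq⟩, hch, hle⟩ := hw
    refine ⟨⟨⟨by omega, hp⟩, by omega⟩, by omega, ?_⟩
    have e : 2 * p - (2 * p - q) = q := by omega
    rw [e]; exact hch
  · rintro ⟨p, q⟩ hz
    simp only [pvSS, Finset.mem_filter, Finset.mem_product, Finset.mem_range] at hz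
    obtain ⟨⟨⟨hp, hq⟩, hpq⟩, hk, hch⟩ := hz
    simp only [Prod.mk.injEq, and_true]
    omega
  · rintro ⟨p, q⟩ hw
    simp only [pvSS, Finset.mem_filter, Finset.mem_product, Finset.mem_range] at hw
    obtain ⟨⟨⟨hp, hq⟩, hpq⟩, hch, hle⟩ := hw
    simp only [Prod.mk.injEq, true_and]
    omega
  · intro z _
    rfl

lemma pvE3_reindex (cs : List Char) :
    (∑ z ∈ pvSS cs.length, pvE3A cs z.1 z.2) = ∑ z ∈ pvSS cs.length, pvE3B cs z.1 z.2 := by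
  rw [show (∑ z ∈ pvSS cs.length, pvE3A cs z.1 z.2)
      = ∑ z ∈ (pvSS cs.length).filter
          (fun z => 2 * z.2 - z.1 < cs.length ∧ cs[z.1]? = cs[2 * z.2 - z.1]?),
            (if cs[z.1]? = cs[z.2]? then (-1 : Int) else 1) from by
    rw [Finset.sum_filter]; exact Finset.sum_congr rfl fun z _ => rfl]
  rw [show (∑ z ∈ pvSS cs.length, pvE3B cs z.1 z.2)
      = ∑ z ∈ (pvSS cs.length).filter
          (fun z => cs[z.1]? = cs[z.2]? ∧ (z.1 + z.2) % 2 = 0),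
            (if cs[(z.1 + z.2) / 2]? = cs[z.2]? then (-1 : Int) else 1) from by
    rw [Finset.sum_filter]; exact Finset.sum_congr rfl fun z _ => rfl]
  refine Finset.sum_nbij' (fun z => (z.1, 2 * z.2 - z.1)) (fun w => (w.1, (w.1 + w.2) / 2))
    ?_ ?_ ?_ ?_ ?_
  · rintro ⟨p, q⟩ hz
    simp only [pvSS, Finset.mem_filter, Finset.mem_product, Finset.mem_range] at hz ⊢
    obtain ⟨⟨⟨hp, hq⟩, hpq⟩, hk, hch⟩ := hz
    exact ⟨⟨⟨hp, hk⟩, by omega⟩, hch, by omega⟩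
  · rintro ⟨p, q⟩ hw
    simp only [pvSS, Finset.mem_filter, Finset.mem_product, Finset.mem_range] at hw ⊢
    obtain ⟨⟨⟨hp, hq⟩, hpq⟩, hch, hev⟩ := hw
    refine ⟨⟨⟨hp, by omega⟩, by omega⟩, by omega, ?_⟩
    have e : 2 * ((p + q) / 2) - p = q := by omega
    rw [e]; exact hch
  · rintro ⟨p, q⟩ hz
    simp only [pvSS, Finset.mem_filter, Finset.mem_product, Finset.mem_range] at hz
    obtain ⟨⟨⟨hp, hq⟩, hpq⟩, hk, hch⟩ := hz
    simp only [Prod.mk.injEq, true_and]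
    omega
  · rintro ⟨p, q⟩ hw
    simp only [pvSS, Finset.mem_filter, Finset.mem_product, Finset.mem_range] at hw
    obtain ⟨⟨⟨hp, hq⟩, hpq⟩, hch, hev⟩ := hw
    simp only [Prod.mk.injEq, true_and]
    omega
  · rintro ⟨p, q⟩ hz
    simp only [pvSS, Finset.mem_filter, Finset.mem_product, Finset.mem_range] at hz
    obtain ⟨⟨⟨hp, hq⟩, hpq⟩, hk, hch⟩ := hz
    have e : (p + (2 * q - p)) / 2 = q := by omega
    simp only [e]
    refine if_congr ⟨fun h' => h'.symm.trans hch, fun h' => hch.trans h'.symm⟩ rfl rfl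

-- closed form for the total number of APs
lemma pvInnerCount (n q : Nat) (hq : q < n) :
    (∑ p ∈ Finset.range q, pvC0 n p q) = ((min q (n - 1 - q) : Nat) : Int) := by
  unfold pvC0
  rw [Finset.sum_boole]
  have hf : (Finset.range q).filter (fun p => 2 * q - p < n) = Finset.Ico (2 * q + 1 - n) q := by
    ext p
    simp only [Finset.mem_filter, Finset.mem_range, Finset.mem_Ico]
    omega
  rw [hf, Nat.card_Ico]
  have : q - (2 * q + 1 - n) = min q (n - 1 - q) := by omega
  rw [this]

lemma pvMinSum (n : Nat) :
    (∑ q ∈ Finset.range n, min q (n - 1 - q)) = (n - 1) * (n - 1) / 4 := by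
  induction n using Nat.strong_induction_on with
  | _ n ih =>
    match n with
    | 0 => simp
    | 1 => simp
    | (m + 2) =>
      have IH := ih m (by omega)
      have step : (∑ q ∈ Finset.range (m + 2), min q (m + 2 - 1 - q))
          = (∑ q ∈ Finset.range m, min q (m - 1 - q)) + m := by
        rw [Finset.sum_range_succ', Finset.sum_range_succ]
        have hmin : ∀ q ∈ Finset.range m,
            min (q + 1) (m + 2 - 1 - (q + 1)) = min q (m - 1 - q) + 1 := by
          intro q hq
          have := Finset.mem_range.1 hq
          omega
        rw [Finset.sum_congr rfl hmin, Finset.sum_add_distrib, Finset.sum_const, smul_eq_mul,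
          Finset.card_range]
        omega
      rw [step, IH]
      rcases Nat.even_or_odd m with ⟨t, ht⟩ | ⟨t, ht⟩
      · subst ht
        match t with
        | 0 => decide
        | (u + 1) =>
          have hm1 : (u + 1) + (u + 1) - 1 = 2 * u + 1 := by omega
          have hm2 : (u + 1) + (u + 1) + 2 - 1 = 2 * u + 3 := by omega
          have e1 : (2 * u + 1) * (2 * u + 1) = 4 * (u * u + u) + 1 := by ring
          have e2 : (2 * u + 3) * (2 * u + 3) = 4 * (u * u + 3 * u + 2) + 1 := by ring
          rw [hm1, hm2, e1, e2]
          set w := u * u with hw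
          omega
      · have hm1 : m - 1 = 2 * t := by omega
        have hm2 : m + 2 - 1 = 2 * t + 2 := by omega
        have e1 : (2 * t) * (2 * t) = 4 * (t * t) := by ring
        have e2 : (2 * t + 2) * (2 * t + 2) = 4 * (t * t + 2 * t + 1) := by ring
        rw [hm1, hm2, e1, e2]
        set w := t * t with hw
        omega

lemma pvTotal (n : Nat) :
    (∑ z ∈ pvSS n, pvC0 n z.1 z.2) = (((n - 1) * (n - 1) / 4 : Nat) : Int) := by
  rw [← pvTriangle2 n (fun p q => pvC0 n p q)]
  have h1 : ∀ q ∈ Finset.range n,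
      (∑ p ∈ Finset.range q, pvC0 n p q) = ((min q (n - 1 - q) : Nat) : Int) :=
    fun q hq => pvInnerCount n q (Finset.mem_range.1 hq)
  rw [Finset.sum_congr rfl h1, ← Nat.cast_sum, pvMinSum]

lemma pvClosed (n : Nat) :
    PySem.Int.floordiv (((n : Int) - 1) ^ 2) 4 = (((n - 1) * (n - 1) / 4 : Nat) : Int) := by
  match n with
  | 0 => decide
  | (m + 1) =>
    have h1 : ((m + 1 : Nat) : Int) - 1 = (m : Int) := by push_cast; ring
    have h2 : ((m : Int)) ^ 2 = ((m * m : Nat) : Int) := by push_cast; ring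
    rw [h1, h2]
    have h3 : PySem.Int.floordiv ((m * m : Nat) : Int) 4 = ((m * m / 4 : Nat) : Int) := by
      exact_mod_cast PySem.Int.floordiv_natCast (m * m) 4
    rw [h3]
    norm_num

-- the ports as triangle sums
lemma pvA_sum (s : String) :
    calc_py s = ∑ z ∈ pvSS s.toList.length, pvTA s.toList z.1 z.2 := by
  simp only [calc_py]
  refine .trans (PySem.List.foldl_congr_mem _ _
      (fun cnt i => cnt + ((PySem.List.pyRange (i + 1) (PySem.Str.len s)).map
        (pvTermA s.toList (PySem.Str.len s) i)).sum) _
      (fun acc x _ => pvA_body s (PySem.Str.len s) x _ acc)) ?_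
  rw [PySem.List.foldl_add, zero_add]
  simp only [PySem.Str.len_eq]
  rw [PySem.List.pyRange_zero_natCast, List.map_map, pvSumRange, ← pvTriangle1]
  refine Finset.sum_congr rfl fun i hi => ?_
  simp only [Function.comp]
  rw [show ((i : Int) + 1) = ((i + 1 : Nat) : Int) from by push_cast; ring,
      pvPyRange_natCast (i + 1) s.toList.length, List.map_map, pvSumRange]
  refine Finset.sum_congr rfl fun t ht => ?_
  simp only [Function.comp]
  exact pvTermA_cast s.toList i (i + 1 + t) (by omega)

lemma pvB_sum (s : String) :
    calc_py_alt s = PySem.Int.floordiv (((s.toList.length : Int) - 1) ^ 2) 4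
      - ∑ z ∈ pvSS s.toList.length, pvTB s.toList z.1 z.2 := by
  simp only [calc_py_alt]
  have hbad : (PySem.List.pyRange 0 (PySem.Str.len s : Int)).foldl (fun bad q =>
      (PySem.List.pyRange 0 q).foldl (fun bad p =>
        if PySem.Str.pyGet? s p == PySem.Str.pyGet? s q then
          let bad := if 2 * q - p < (PySem.Str.len s : Int) then bad + 1 else bad
          let bad := if 2 * p ≥ q then bad + 1 else bad
          if PySem.Int.mod (p + q) 2 == 0 then
            let bad := bad + 1
            if PySem.Str.pyGet? s (PySem.Int.floordiv (p + q) 2) == PySem.Str.pyGet? s q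
            then bad - 2 else bad
          else bad
        else bad) bad) 0
      = ∑ z ∈ pvSS s.toList.length, pvTB s.toList z.1 z.2 := by
    refine .trans (PySem.List.foldl_congr_mem _ _
        (fun bad q => bad + ((PySem.List.pyRange 0 q).map (pvTermB s.toList q)).sum) _
        (fun acc x _ => pvB_body s x _ acc)) ?_
    rw [PySem.List.foldl_add, zero_add]
    simp only [PySem.Str.len_eq]
    rw [PySem.List.pyRange_zero_natCast, List.map_map, pvSumRange, ← pvTriangle2]
    refine Finset.sum_congr rfl fun q hq => ?_
    simp only [Function.comp]
    rw [PySem.List.pyRange_zero_natCast, List.map_map, pvSumRange]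
    exact Finset.sum_congr rfl fun p hp => pvTermB_cast s.toList p q (Finset.mem_range.1 hp)
  rw [hbad, PySem.Str.len_eq]

-- ===== VERDICT (by name: the statement is the Claim_ definition above) =====
theorem calc_py_spec : Claim_equal_calc_py := by
  intro s _
  unfold Spec_calc_py
  rw [pvA_sum, pvB_sum, pvClosed]
  have hA : (∑ z ∈ pvSS s.toList.length, pvTA s.toList z.1 z.2)
      = ∑ z ∈ pvSS s.toList.length,
          (pvC0 s.toList.length z.1 z.2 - pvE1 s.toList z.1 z.2
            - pvE2A s.toList z.1 z.2 - pvE3A s.toList z.1 z.2) :=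
    Finset.sum_congr rfl (fun z _ => pvTA_split s.toList z.1 z.2)
  have hB : (∑ z ∈ pvSS s.toList.length, pvTB s.toList z.1 z.2)
      = ∑ z ∈ pvSS s.toList.length,
          (pvE1 s.toList z.1 z.2 + pvE2B s.toList z.1 z.2 + pvE3B s.toList z.1 z.2) :=
    Finset.sum_congr rfl (fun z _ => pvTB_split s.toList z.1 z.2)
  rw [hA, hB]
  rw [Finset.sum_sub_distrib, Finset.sum_sub_distrib, Finset.sum_sub_distrib]
  rw [Finset.sum_add_distrib, Finset.sum_add_distrib]
  rw [pvTotal, pvE2_reindex, pvE3_reindex]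
  ring
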